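-- pv_equiv track=rewrite | github.com/tsinampoizina/CR4D_project | climatology all chars CORDEX.py | month_start_end
-- ===== SOURCE A (Python) =====
-- def month_start_end(year):
--     month_lengths = [0, 31, 28, 31, 30, 31, 30, 31, 31, 30, 31, 30, 31]
--     if year in range(1964, 2021, 4):
--         month_lengths[2] = 29
--     month_start_end_list = [(0, 1)]
--     for mo in range(1, 13):
--         s, e = month_start_end_list[-1]
--         month_start_end_list.append((e, e + month_lengths[mo]-1))
--     return month_start_end_list
-- ===== SOURCE B (Python) =====
-- # Closed-form: precomputed cumulative day-boundary table; leap years just shift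
-- # every boundary from February onward by a fixed offset. No running accumulation.
-- CUM = [1, 31, 58, 88, 117, 147, 176, 206, 236, 265, 295, 324, 354]
--
-- def month_start_end(year):
--     leap = 1 if (1964 <= year <= 2020 and year % 4 == 0) else 0
--
--     def b(k):
--         return CUM[k] + (leap if k >= 2 else 0)
--
--     return [(0, 1)] + [(b(m - 1), b(m)) for m in range(1, 13)]
-- ===== Notes on version B (the rewrite author's own statement) =====
-- stated objective: alternative
-- what changed: B replaces A's accumulating loop (which re-reads the list's last pair each iteration) by a closed-form lookup: a precomputed constant table of cumulative month-end boundaries, with leap years handled as a fixed offset applied to every boundary from February's end on; each month's pair is computed independently from the table.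
import Mathlib
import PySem

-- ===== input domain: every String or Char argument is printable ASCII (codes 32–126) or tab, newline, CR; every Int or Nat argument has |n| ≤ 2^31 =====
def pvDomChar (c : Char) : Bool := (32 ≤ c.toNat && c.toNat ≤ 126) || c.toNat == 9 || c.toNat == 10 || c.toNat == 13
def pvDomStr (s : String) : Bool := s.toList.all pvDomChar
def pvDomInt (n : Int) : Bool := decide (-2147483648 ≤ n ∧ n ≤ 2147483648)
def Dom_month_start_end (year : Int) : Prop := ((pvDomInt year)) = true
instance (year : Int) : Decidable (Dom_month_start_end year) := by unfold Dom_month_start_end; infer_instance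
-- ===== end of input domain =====

-- B replaces A's accumulating loop by independent lookups in a precomputed constant
-- table of cumulative month-end boundaries, leap years being a fixed offset from
-- February's end on; objective: alternative decomposition (no speed claim).

-- ===== PORT A =====
def month_start_end (year : Int) : List (Int × Int) :=
  let month_lengths : List Int := [0, 31, 28, 31, 30, 31, 30, 31, 31, 30, 31, 30, 31]
  let month_lengths :=
    if (PySem.List.pyRange 1964 2021 4).contains year then month_lengths.set 2 29
    else month_lengths
  (PySem.List.pyRange 1 13 1).foldl (fun acc mo =>
    match PySem.List.pyGet? acc (-1), PySem.List.pyGet? month_lengths mo with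
    | some (_, e), some l => acc ++ [(e, e + l - 1)]
    | _, _ => acc)  -- unreachable: acc is nonempty and mo ∈ [1,12]
    [(0, 1)]

-- ===== PORT B =====
-- module-level constant CUM of Source B
def pvCUM : List Int := [1, 31, 58, 88, 117, 147, 176, 206, 236, 265, 295, 324, 354]

def month_start_end_alt (year : Int) : List (Int × Int) :=
  let leap : Int := if 1964 ≤ year ∧ year ≤ 2020 ∧ PySem.Int.mod year 4 = 0 then 1 else 0
  -- CUM[k] for k ∈ [0,12] is always in range in Source B, so getD 0 is never taken
  let b := fun (k : Int) => (PySem.List.pyGet? pvCUM k).getD 0 + (if 2 ≤ k then leap else 0)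
  [(0, 1)] ++ (PySem.List.pyRange 1 13 1).map (fun m => (b (m - 1), b m))

-- ===== PRECONDITION & SPEC =====
def Spec_month_start_end (year : Int) (out : List (Int × Int)) : Prop := out = month_start_end_alt year
instance (year : Int) (out : List (Int × Int)) : Decidable (Spec_month_start_end year out) := by unfold Spec_month_start_end; infer_instance

-- ===== CLAIM (what is proved, stated in full; the proofs are below) =====
def Claim_equal_month_start_end : Prop := ∀ (year : Int), Dom_month_start_end year → Spec_month_start_end year (month_start_end year)

-- ===== LEMMAS AND PROOFS =====

-- Both leap tests agree: year ∈ range(1964, 2021, 4) ⟺ 1964 ≤ year ≤ 2020 ∧ year % 4 = 0.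
theorem leap_cond_eq (year : Int) :
    (PySem.List.pyRange 1964 2021 4).contains year =
      decide (1964 ≤ year ∧ year ≤ 2020 ∧ PySem.Int.mod year 4 = 0) := by
  have h : PySem.List.pyRange 1964 2021 4 =
      [1964, 1968, 1972, 1976, 1980, 1984, 1988, 1992, 1996, 2000,
       2004, 2008, 2012, 2016, 2020] := by decide
  rw [h, List.contains_eq_mem, decide_eq_decide]
  simp only [List.mem_cons, List.not_mem_nil, or_false]
  have hm := PySem.Int.floordiv_mul_add_mod year 4
  constructor
  · rintro (h|h|h|h|h|h|h|h|h|h|h|h|h|h|h) <;> subst h <;> exact ⟨by omega, by omega, by decide⟩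
  · rintro ⟨h1, h2, h3⟩
    rw [h3] at hm
    omega

-- ===== VERDICT (by name: the statement is the Claim_ definition above) =====
theorem month_start_end_spec : Claim_equal_month_start_end := by
  intro year _
  unfold Spec_month_start_end month_start_end month_start_end_alt
  rw [leap_cond_eq]
  by_cases h : (1964 ≤ year ∧ year ≤ 2020 ∧ PySem.Int.mod year 4 = 0)
  · simp only [h]
    decide
  · simp only [h, decide_false]
    decide
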